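-- pv_equiv track=rewrite | github.com/a-gram/udsp | udsp/zombies/mtx.py | mat_toeplitz
-- ===== SOURCE A (Python) =====
-- def mat_new(rows, cols, init=0):
--     """
--     Creates a new initialized matrix
--
--     Parameters
--     ----------
--     rows: int
--         The number of rows
--     cols: int
--         The number of columns
--     init: scalar, callable, optional
--         The initializer expression. It can be a scalar value or a
--         callable object (function, lambda, etc.) that will be invoked
--         for each element in the matrix. The callable object must have
--         the signature f(n, m), where the arguments n,m indicate the
--         indices of rows and columns respectively.
--
--     Returns
--     -------
--     list[list]
--         An initialized matrix
--
--     """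
--
--     if callable(init):
--         return [[init(n, m) for m in range(cols)]
--                             for n in range(rows)]
--     else:
--         return [[init] * cols for _ in range(rows)]
--
-- def mat_toeplitz(h, g):
--     """
--     Constructs a Toeplitz matrix from the given sequences
--
--     Parameters
--     ----------
--     h: list[]
--         A sequence defining the matrix for non-negative indices.
--         This will define the number of rows.
--     g: list[]
--         A sequence defining the matrix for negative indices. This
--         will define the number of columns.
--
--     Returns
--     -------
--     list[list]
--         A Toeplitz matrix
--
--     """
--     rows, cols = len(h), len(g)
--     T = mat_new(rows, cols)
--     for col in range(cols):
--         for row in range(rows):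
--             i = row - col
--             T[row][col] = h[i] if i >= 0 else g[-i]
--     return T
-- ===== SOURCE B (Python) =====
-- def mat_toeplitz(h, g):
--     rows, cols = len(h), len(g)
--     w = list(reversed(h)) + g[1:]
--     return [w[rows - 1 - row : rows - 1 - row + cols] for row in range(rows)]
-- ===== Notes on version B (the rewrite author's own statement) =====
-- stated objective: faster
-- what changed: Replaces the per-cell double loop writing into a pre-allocated matrix with building the diagonal vector reversed(h)+g[1:] once and taking each row as one contiguous slice of it.
import Mathlib
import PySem

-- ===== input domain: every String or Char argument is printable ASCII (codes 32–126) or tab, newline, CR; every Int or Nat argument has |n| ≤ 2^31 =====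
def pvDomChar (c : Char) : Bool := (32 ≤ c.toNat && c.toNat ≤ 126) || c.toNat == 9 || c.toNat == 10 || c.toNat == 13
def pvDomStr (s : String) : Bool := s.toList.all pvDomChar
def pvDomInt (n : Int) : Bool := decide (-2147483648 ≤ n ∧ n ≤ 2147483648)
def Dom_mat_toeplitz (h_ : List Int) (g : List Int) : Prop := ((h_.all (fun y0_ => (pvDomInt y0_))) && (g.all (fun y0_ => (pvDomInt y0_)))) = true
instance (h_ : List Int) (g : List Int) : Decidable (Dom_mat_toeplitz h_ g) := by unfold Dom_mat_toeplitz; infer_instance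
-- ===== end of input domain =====

-- B builds the diagonal vector reversed(h)+g[1:] once and slices each row out of it,
-- instead of A's per-cell double loop writing into a pre-allocated zero matrix (measured constant-factor speedup; return values proved equal).

-- ===== PORT A =====
-- port of mat_new for a scalar init (the only way A calls it: the non-callable branch)
def mat_new (rows cols : Nat) (init : Int) : List (List Int) :=
  (List.range rows).map (fun _ => List.replicate cols init)

def mat_toeplitz (h_ : List Int) (g : List Int) : List (List Int) :=
  let rows := h_.length
  let cols := g.length
  let T := mat_new rows cols 0
  (List.range cols).foldl (fun T (col : Nat) =>
    (List.range rows).foldl (fun T (row : Nat) =>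
      let i : Int := (row : Int) - (col : Int)
      T.set row ((T.getD row []).set col
        (if 0 ≤ i then PySem.List.pyGetD h_ i 0 else PySem.List.pyGetD g (-i) 0))) T) T

-- ===== PORT B =====
def mat_toeplitz_alt (h_ : List Int) (g : List Int) : List (List Int) :=
  let rows := h_.length
  let cols := g.length
  let w := h_.reverse ++ PySem.List.slice g (some 1) none
  (List.range rows).map (fun (row : Nat) =>
    PySem.List.slice w (some ((rows : Int) - 1 - (row : Int)))
                       (some ((rows : Int) - 1 - (row : Int) + (cols : Int))))

-- ===== PRECONDITION & SPEC =====
def Spec_mat_toeplitz (h_ : List Int) (g : List Int) (out : List (List Int)) : Prop := out = mat_toeplitz_alt h_ g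
instance (h_ : List Int) (g : List Int) (out : List (List Int)) : Decidable (Spec_mat_toeplitz h_ g out) := by unfold Spec_mat_toeplitz; infer_instance

-- ===== CLAIM (what is proved, stated in full; the proofs are below) =====
def Claim_equal_mat_toeplitz : Prop := ∀ (h_ : List Int) (g : List Int), Dom_mat_toeplitz h_ g → Spec_mat_toeplitz h_ g (mat_toeplitz h_ g)

-- ===== LEMMAS AND PROOFS =====

-- the cell value A writes at (row, col), in A's Int-index form and in Nat form
def vA (h_ g : List Int) (row col : Nat) : Int :=
  if 0 ≤ (row : Int) - (col : Int) then PySem.List.pyGetD h_ ((row : Int) - (col : Int)) 0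
  else PySem.List.pyGetD g (-((row : Int) - (col : Int))) 0

def tv (h_ g : List Int) (row col : Nat) : Int :=
  if col ≤ row then h_.getD (row - col) 0 else g.getD (col - row) 0

lemma vA_eq_tv (h_ g : List Int) (r c : Nat) : vA h_ g r c = tv h_ g r c := by
  unfold vA tv
  by_cases h : c ≤ r
  · have h1 : (r : Int) - (c : Int) = ((r - c : Nat) : Int) := by omega
    rw [if_pos (by omega), if_pos h, h1, PySem.List.pyGetD_natCast]
  · have h1 : -((r : Int) - (c : Int)) = ((c - r : Nat) : Int) := by omega
    rw [if_neg (by omega), if_neg h, h1, PySem.List.pyGetD_natCast]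

-- the common closed form both ports are reduced to
def tpzRow (h_ g : List Int) (r : Nat) : List Int := (List.range g.length).map (tv h_ g r)

def tpzMat (h_ g : List Int) : List (List Int) := (List.range h_.length).map (tpzRow h_ g)

-- ---- A side ----

-- A's inner row loop (column `col` fixed) sets column `col` of each of the first n rows
lemma inner_eq (h_ g : List Int) (col : Nat) :
    ∀ (n : Nat) (T : List (List Int)),
      (List.range n).foldl (fun T (row : Nat) =>
          T.set row ((T.getD row []).set col (vA h_ g row col))) T
        = T.mapIdx (fun r x => if r < n then x.set col (vA h_ g r col) else x) := by
  intro n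
  induction n with
  | zero =>
    intro T
    simp only [List.range_zero, List.foldl_nil, if_neg (Nat.not_lt_zero _)]
    apply List.ext_getElem <;> simp
  | succ n ih =>
    intro T
    rw [List.range_succ, List.foldl_append, List.foldl_cons, List.foldl_nil, ih]
    apply List.ext_getElem
    · simp
    · intro j hj hj'
      have hjT : j < T.length := by simpa using hj'
      simp only [List.getElem_set, List.getElem_mapIdx]
      by_cases hje : j = n
      · subst hje
        have hD : (T.mapIdx (fun r x => if r < j then x.set col (vA h_ g r col) else x)).getD j []
            = T[j] := by
          rw [List.getD_eq_getElem?_getD, List.getElem?_eq_getElem (by simpa using hjT)]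
          simp
        rw [if_pos rfl, hD, if_pos (by omega)]
      · rw [if_neg (by omega : ¬ n = j)]
        by_cases hlt : j < n
        · rw [if_pos hlt, if_pos (by omega)]
        · rw [if_neg hlt, if_neg (by omega)]

-- A's outer column loop of row-wise set steps = per-row fold over the columns
lemma outer_eq (h_ g : List Int) :
    ∀ (L : List Nat) (T : List (List Int)),
      L.foldl (fun T col => T.mapIdx (fun r x => if r < h_.length then x.set col (vA h_ g r col) else x)) T
        = T.mapIdx (fun r x => if r < h_.length then L.foldl (fun x col => x.set col (vA h_ g r col)) x else x) := by
  intro L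
  induction L with
  | nil =>
    intro T
    simp only [List.foldl_nil]
    apply List.ext_getElem <;> simp
  | cons c L ih =>
    intro T
    rw [List.foldl_cons, ih]
    apply List.ext_getElem
    · simp
    · intro r hr hr'
      simp only [List.getElem_mapIdx, List.foldl_cons]
      by_cases h : r < h_.length <;> simp [h]

-- filling the zero row column by column gives the mapped row
lemma rowfold_eq (h_ g : List Int) (r : Nat) :
    ∀ (k : Nat), k ≤ g.length →
      (List.range k).foldl (fun x col => x.set col (vA h_ g r col)) (List.replicate g.length 0)
        = (List.range k).map (tv h_ g r) ++ List.replicate (g.length - k) 0 := by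
  intro k
  induction k with
  | zero => simp
  | succ k ih =>
    intro hk
    rw [List.range_succ, List.foldl_append, List.foldl_cons, List.foldl_nil,
        ih (by omega), List.map_append]
    apply List.ext_getElem
    · simp; omega
    · intro c hc hc'
      simp only [List.getElem_set, List.getElem_append, List.getElem_map,
        List.getElem_range, List.getElem_replicate, List.length_map, List.length_range,
        List.length_append, List.length_cons, List.length_nil, List.getElem_singleton]
      split_ifs <;> first | rfl | omega | simp [vA_eq_tv]

lemma A_eq_tpz (h_ g : List Int) : mat_toeplitz h_ g = tpzMat h_ g := by
  unfold mat_toeplitz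
  have hstep : ∀ (T : List (List Int)) (col : Nat),
      (List.range h_.length).foldl (fun T (row : Nat) =>
          T.set row ((T.getD row []).set col
            (if 0 ≤ (row : Int) - (col : Int) then PySem.List.pyGetD h_ ((row:Int) - (col:Int)) 0
             else PySem.List.pyGetD g (-((row:Int) - (col:Int))) 0))) T
        = T.mapIdx (fun r x => if r < h_.length then x.set col (vA h_ g r col) else x) := by
    intro T col
    exact inner_eq h_ g col h_.length T
  have hfun : (fun (T : List (List Int)) (col : Nat) =>
      (List.range h_.length).foldl (fun T (row : Nat) =>
          T.set row ((T.getD row []).set col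
            (if 0 ≤ (row : Int) - (col : Int) then PySem.List.pyGetD h_ ((row:Int) - (col:Int)) 0
             else PySem.List.pyGetD g (-((row:Int) - (col:Int))) 0))) T)
      = fun (T : List (List Int)) (col : Nat) =>
          T.mapIdx (fun r x => if r < h_.length then x.set col (vA h_ g r col) else x) :=
    funext fun T => funext fun col => hstep T col
  dsimp only
  rw [hfun, outer_eq]
  unfold tpzMat mat_new
  apply List.ext_getElem
  · simp
  · intro r hr hr'
    simp only [List.getElem_mapIdx, List.getElem_map, List.getElem_range]
    have hrn : r < h_.length := by simpa using hr'
    rw [if_pos hrn, rowfold_eq h_ g r g.length (le_refl _)]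
    simp [tpzRow]

-- ---- B side ----

lemma B_eq_tpz (h_ g : List Int) : mat_toeplitz_alt h_ g = tpzMat h_ g := by
  unfold mat_toeplitz_alt tpzMat
  dsimp only
  apply List.ext_getElem
  · simp
  · intro r hr hr'
    simp only [List.getElem_map, List.getElem_range]
    have hrn : r < h_.length := by simpa using hr
    have hs : (h_.length : Int) - 1 - (r : Int) = ((h_.length - 1 - r : Nat) : Int) := by omega
    rw [hs, PySem.List.slice_natCast_add, PySem.List.slice_from_one, ← List.drop_one]
    apply List.ext_getElem
    · simp [tpzRow]
      omega
    · intro c hc hc'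
      have hcc : c < g.length := by simpa [tpzRow] using hc'
      simp only [List.getElem_take, List.getElem_drop, tpzRow, List.getElem_map,
        List.getElem_range]
      unfold tv
      by_cases hcr : c ≤ r
      · have hlt : h_.length - 1 - r + c < h_.reverse.length := by simp; omega
        rw [List.getElem_append_left hlt, List.getElem_reverse]
        have hidx : h_.length - 1 - (h_.length - 1 - r + c) = r - c := by omega
        rw [if_pos hcr, List.getD_eq_getElem _ _ (by omega)]
        simp only [hidx]
      · have hge : h_.reverse.length ≤ h_.length - 1 - r + c := by simp; omega
        rw [List.getElem_append_right hge, if_neg hcr]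
        simp only [List.getElem_drop]
        have hidx : 1 + (h_.length - 1 - r + c - h_.reverse.length) = c - r := by
          simp; omega
        rw [List.getD_eq_getElem _ _ (by omega)]
        simp only [hidx]

-- ===== VERDICT (by name: the statement is the Claim_ definition above) =====
theorem mat_toeplitz_spec : Claim_equal_mat_toeplitz := by
  intro h_ g _
  unfold Spec_mat_toeplitz
  rw [A_eq_tpz, B_eq_tpz]
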